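-- pv_equiv track=rewrite | github.com/YYYChang/Basic-Algorithms | 02_07_fpartial_sum.py | par_sum_fibo
-- ===== SOURCE A (Python) =====
-- def par_sum_fibo(n, m) :
--     a, b = n % 60, m % 60
--     if n == 0 : a = 0
--     elif a == 0 : a = 60
--     elif b == 0 : b = 60
--
--     current, next, sum1, sum2 = 0, 1, 0, 0
--
--     for i in range(max(a,b)+1) :
--         if a != 0 and i <= a-1 :
--             sum1 = (sum1 + current) % 10
--         if i <= b :
--             sum2 = (sum2 + current) % 10
--         next, current = (current + next) % 10, next % 10
--     return (sum2 + 10 - sum1) % 10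
-- ===== SOURCE B (Python) =====
-- def par_sum_fibo(n, m):
--     a, b = n % 60, m % 60
--     if n == 0: a = 0
--     elif a == 0: a = 60
--     elif b == 0: b = 60
--
--     L = max(a, b) + 1
--     digits = []
--     c, nx = 0, 1
--     for _ in range(L):
--         digits.append(c)
--         c, nx = nx % 10, (c + nx) % 10
--
--     pref = [0]
--     s = 0
--     for d in digits:
--         s = (s + d) % 10
--         pref.append(s)
--
--     sum1 = 0 if a == 0 else pref[a]
--     sum2 = pref[b + 1]
--     return (sum2 + 10 - sum1) % 10
-- ===== Notes on version B (the rewrite author's own statement) =====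
-- stated objective: alternative
-- what changed: Replaced A's single interleaved loop with conditional accumulation of two running sums by a table-then-index decomposition: build the array of Fibonacci last digits up to max(a,b), take its prefix sums mod 10, and read the two sums off at indices a and b+1.
import Mathlib
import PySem

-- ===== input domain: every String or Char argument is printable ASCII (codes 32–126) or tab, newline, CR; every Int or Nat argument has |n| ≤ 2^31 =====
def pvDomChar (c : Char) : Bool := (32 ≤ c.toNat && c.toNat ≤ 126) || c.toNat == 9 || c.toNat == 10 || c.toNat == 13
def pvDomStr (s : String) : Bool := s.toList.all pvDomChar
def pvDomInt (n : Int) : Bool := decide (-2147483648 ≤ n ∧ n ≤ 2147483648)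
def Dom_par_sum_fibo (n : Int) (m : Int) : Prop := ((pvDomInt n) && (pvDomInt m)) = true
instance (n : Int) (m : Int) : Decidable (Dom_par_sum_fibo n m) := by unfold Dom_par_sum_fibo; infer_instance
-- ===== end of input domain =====

-- B replaces A's single interleaved guarded-accumulation loop by a table of Fibonacci last
-- digits plus its prefix sums mod 10, indexed at a and b+1 (different decomposition, same cost).

-- ===== PORT A =====
-- loop body of A: state (current, next, sum1, sum2), one iteration at index i
def pvStepA (a : Int) (b : Int) (st : Int × Int × Int × Int) (i : Int) : Int × Int × Int × Int :=
  let current := st.1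
  let next := st.2.1
  let sum1 := if a ≠ 0 ∧ i ≤ a - 1 then PySem.Int.mod (st.2.2.1 + current) 10 else st.2.2.1
  let sum2 := if i ≤ b then PySem.Int.mod (st.2.2.2 + current) 10 else st.2.2.2
  (PySem.Int.mod next 10, PySem.Int.mod (current + next) 10, sum1, sum2)

-- the interleaved loop over i in range(max(a,b)+1)
def pvLoopA (a : Int) (b : Int) : Int :=
  let st := (PySem.List.pyRange 0 (max a b + 1) 1).foldl (pvStepA a b) (0, 1, 0, 0)
  PySem.Int.mod (st.2.2.2 + 10 - st.2.2.1) 10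

def par_sum_fibo (n : Int) (m : Int) : Int :=
  let a := PySem.Int.mod n 60
  let b := PySem.Int.mod m 60
  let ab := if n = 0 then ((0 : Int), b)
            else if a = 0 then ((60 : Int), b)
            else if b = 0 then (a, (60 : Int))
            else (a, b)
  pvLoopA ab.1 ab.2

-- ===== PORT B =====
-- loop body building the digits table: state (digits, c, nx)
def pvStepD (st : List Int × Int × Int) (_i : Int) : List Int × Int × Int :=
  (st.1 ++ [st.2.1], PySem.Int.mod st.2.2 10, PySem.Int.mod (st.2.1 + st.2.2) 10)

-- loop body building the prefix sums: state (pref, s)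
def pvStepP (p : List Int × Int) (d : Int) : List Int × Int :=
  let s := PySem.Int.mod (p.2 + d) 10
  (p.1 ++ [s], s)

-- build the table of Fibonacci last digits, then its prefix sums mod 10, then index it
def pvTableB (a : Int) (b : Int) : Int :=
  let L := max a b + 1
  let dcn := (PySem.List.pyRange 0 L 1).foldl pvStepD ([], 0, 1)
  let ps := dcn.1.foldl pvStepP ([(0 : Int)], 0)
  let pref := ps.1
  -- pref[a] and pref[b+1]: always in range here, so getD 0 never falls back to the default
  let sum1 := if a = 0 then (0 : Int) else (PySem.List.pyGet? pref a).getD 0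
  let sum2 := (PySem.List.pyGet? pref (b + 1)).getD 0
  PySem.Int.mod (sum2 + 10 - sum1) 10

def par_sum_fibo_alt (n : Int) (m : Int) : Int :=
  let a := PySem.Int.mod n 60
  let b := PySem.Int.mod m 60
  let ab := if n = 0 then ((0 : Int), b)
            else if a = 0 then ((60 : Int), b)
            else if b = 0 then (a, (60 : Int))
            else (a, b)
  pvTableB ab.1 ab.2

-- ===== PRECONDITION & SPEC =====
def Spec_par_sum_fibo (n : Int) (m : Int) (out : Int) : Prop := out = par_sum_fibo_alt n m
instance (n : Int) (m : Int) (out : Int) : Decidable (Spec_par_sum_fibo n m out) := by unfold Spec_par_sum_fibo; infer_instance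

-- ===== CLAIM (what is proved, stated in full; the proofs are below) =====
def Claim_equal_par_sum_fibo : Prop := ∀ (n : Int) (m : Int), Dom_par_sum_fibo n m → Spec_par_sum_fibo n m (par_sum_fibo n m)

-- ===== LEMMAS AND PROOFS =====

-- reference sequences: pvF k = (k-th, (k+1)-th) Fibonacci last digit state, pvS k = prefix sum mod 10
def pvF : Nat → Int × Int
  | 0 => (0, 1)
  | k + 1 => (PySem.Int.mod (pvF k).2 10, PySem.Int.mod ((pvF k).1 + (pvF k).2) 10)

def pvS : Nat → Int
  | 0 => 0
  | k + 1 => PySem.Int.mod (pvS k + (pvF k).1) 10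

lemma A_fold (a b : Int) (ha : 0 ≤ a) (hb : 0 ≤ b) (N : Nat) :
    (PySem.List.pyRange 0 (N : Int) 1).foldl (pvStepA a b) (0, 1, 0, 0)
      = ((pvF N).1, (pvF N).2, pvS (min a.toNat N), pvS (min (b + 1).toNat N)) := by
  induction N with
  | zero => simp [pvF, pvS]
  | succ N ih =>
    have hc : ((N + 1 : Nat) : Int) = (N : Int) + 1 := by push_cast; ring
    rw [hc, PySem.List.pyRange_one_succ_right (by positivity), List.foldl_append, ih]
    simp only [List.foldl, pvStepA]
    refine Prod.ext ?_ (Prod.ext ?_ (Prod.ext ?_ ?_))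
    · simp [pvF]
    · simp [pvF]
    · by_cases h : a ≠ 0 ∧ (N : Int) ≤ a - 1
      · have h1 : min a.toNat N = N := by omega
        have h2 : min a.toNat (N + 1) = N + 1 := by omega
        rw [if_pos h, h1, h2]
        simp [pvS]
      · have h2 : min a.toNat (N + 1) = min a.toNat N := by omega
        rw [if_neg h, h2]
    · by_cases h : (N : Int) ≤ b
      · have h1 : min (b + 1).toNat N = N := by omega
        have h2 : min (b + 1).toNat (N + 1) = N + 1 := by omega
        rw [if_pos h, h1, h2]
        simp [pvS]
      · have h2 : min (b + 1).toNat (N + 1) = min (b + 1).toNat N := by omega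
        rw [if_neg h, h2]

lemma loopA_eq (a b : Int) (ha : 0 ≤ a) (hb : 0 ≤ b) :
    pvLoopA a b = PySem.Int.mod (pvS (b + 1).toNat + 10 - pvS a.toNat) 10 := by
  unfold pvLoopA
  have hN : max a b + 1 = (((max a b + 1).toNat : Nat) : Int) := by omega
  rw [hN, A_fold a b ha hb]
  have h1 : min a.toNat (max a b + 1).toNat = a.toNat := by omega
  have h2 : min (b + 1).toNat (max a b + 1).toNat = (b + 1).toNat := by omega
  rw [h1, h2]

lemma dig_fold (N : Nat) :
    (PySem.List.pyRange 0 (N : Int) 1).foldl pvStepD ([], 0, 1)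
      = ((List.range N).map (fun k => (pvF k).1), (pvF N).1, (pvF N).2) := by
  induction N with
  | zero => simp [pvF]
  | succ N ih =>
    have hc : ((N + 1 : Nat) : Int) = (N : Int) + 1 := by push_cast; ring
    rw [hc, PySem.List.pyRange_one_succ_right (by positivity), List.foldl_append, ih]
    simp [pvStepD, pvF, List.range_succ]

lemma pref_fold (N : Nat) :
    ((List.range N).map (fun k => (pvF k).1)).foldl pvStepP ([(0 : Int)], 0)
      = ((List.range (N + 1)).map pvS, pvS N) := by
  induction N with
  | zero => simp [pvS]
  | succ N ih =>
    rw [List.range_succ, List.map_append, List.foldl_append, ih]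
    simp only [List.map, List.foldl, pvStepP]
    refine Prod.ext ?_ ?_
    · rw [List.range_succ (n := N + 1), List.map_append]
      simp [pvS]
    · simp [pvS]

lemma tableB_eq (a b : Int) (ha : 0 ≤ a) (hb : 0 ≤ b) :
    pvTableB a b = PySem.Int.mod (pvS (b + 1).toNat + 10 - pvS a.toNat) 10 := by
  unfold pvTableB
  dsimp only
  have hN : max a b + 1 = (((max a b + 1).toNat : Nat) : Int) := by omega
  rw [hN, dig_fold, pref_fold]
  have hlen : ((List.range ((max a b + 1).toNat + 1)).map pvS).length
      = (max a b + 1).toNat + 1 := by simp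
  have hget : ∀ i : Int, 0 ≤ i → i.toNat < (max a b + 1).toNat + 1 →
      (PySem.List.pyGet? ((List.range ((max a b + 1).toNat + 1)).map pvS) i).getD 0
        = pvS i.toNat := by
    intro i hi hlt
    rw [PySem.List.pyGet?_of_nonneg _ hi]
    simp [hlt]
  rw [hget (b + 1) (by omega) (by omega)]
  by_cases h : a = 0
  · simp [h, pvS]
  · rw [if_neg h, hget a ha (by omega)]

-- ===== VERDICT (by name: the statement is the Claim_ definition above) =====
theorem par_sum_fibo_spec : Claim_equal_par_sum_fibo := by
  intro n m _
  unfold Spec_par_sum_fibo par_sum_fibo par_sum_fibo_alt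
  have ha0 : 0 ≤ PySem.Int.mod n 60 := PySem.Int.mod_nonneg n (by norm_num)
  have hb0 : 0 ≤ PySem.Int.mod m 60 := PySem.Int.mod_nonneg m (by norm_num)
  dsimp only
  split_ifs <;> rw [loopA_eq _ _ (by omega) (by omega), tableB_eq _ _ (by omega) (by omega)]
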